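-- pv_equiv track=rewrite | github.com/Bhubanghimire/Python-code-assignment | tukeys_ninthers.py | tukeys_ninthers
-- ===== SOURCE A (Python) =====
-- def tukeys_ninthers(items):
--     result = None
--     new_items=[]
--     while(len(items)>3):
--         total_break = len(items)//3
--         for idx in range(2,len(items)+2,3):
--             temp_list = [items[idx-2],items[idx-1],items[idx]]
--             temp_list.sort()
--             new_items.append(temp_list[1])
--
--         items=[]
--         items = new_items
--         new_items = []
--     if len(items)==3:
--         items.sort()
--         result = items[1]
--     else:
--         result = items[0]
--     return result
-- ===== SOURCE B (Python) =====
-- def tukeys_ninthers(items):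
--     # recursive chunk-of-3 reduction; does not mutate the caller's list
--     if len(items) > 3:
--         medians = [sorted(items[i:i + 3])[1] for i in range(0, len(items), 3)]
--         return tukeys_ninthers(medians)
--     if len(items) == 3:
--         return sorted(items)[1]
--     return items[0]
-- ===== Notes on version B (the rewrite author's own statement) =====
-- stated objective: simpler
-- what changed: The imperative while-loop with an explicit new_items accumulator and index arithmetic range(2,len+2,3) over items[idx-2..idx] is replaced by a short recursion whose single pass is a slice-based comprehension sorted(items[i:i+3])[1] over chunk starts range(0,len,3).
import Mathlib
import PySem

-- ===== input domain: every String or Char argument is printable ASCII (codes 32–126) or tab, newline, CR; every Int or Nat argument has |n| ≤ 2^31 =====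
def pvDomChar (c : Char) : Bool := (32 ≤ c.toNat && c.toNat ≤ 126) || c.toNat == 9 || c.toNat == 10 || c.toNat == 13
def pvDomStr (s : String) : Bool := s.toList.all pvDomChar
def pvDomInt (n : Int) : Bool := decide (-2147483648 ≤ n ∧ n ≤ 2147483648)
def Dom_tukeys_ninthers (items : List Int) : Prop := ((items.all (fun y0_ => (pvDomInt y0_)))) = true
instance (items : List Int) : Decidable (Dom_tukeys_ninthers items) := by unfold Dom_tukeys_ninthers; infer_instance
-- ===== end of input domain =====

-- B replaces A's while-loop with index arithmetic and a new_items accumulator by a short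
-- recursion over slice-based chunks of three (objective: simpler). Python A sorts the caller's
-- list in place when len(items) <= 3; the equivalence proved here is about the return value only.

-- ===== PORT A =====
-- body of 'for idx in range(2, len(items)+2, 3)': raises (none) when an index is out of range
def aBody (items : List Int) (st : Option (List Int)) (idx : Int) : Option (List Int) :=
  match st with
  | none => none
  | some newItems =>
    match PySem.List.pyGet? items (idx - 2), PySem.List.pyGet? items (idx - 1),
          PySem.List.pyGet? items idx with
    | some x, some y, some z =>
        -- temp_list = [...]; temp_list.sort(); new_items.append(temp_list[1])
        some (newItems ++ [(PySem.List.pyGet? (PySem.List.sorted [x, y, z] (fun v => v) false) 1).getD 0])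
    | _, _, _ => none

-- one iteration of the while-loop body (building new_items from scratch)
def aPass (items : List Int) : Option (List Int) :=
  (PySem.List.pyRange 2 ((items.length : Int) + 2) 3).foldl (aBody items) (some [])

-- the while-loop; fuel bounds the iteration count (length strictly decreases each pass)
def aLoop : Nat → List Int → Option (List Int)
  | 0, _ => none
  | fuel + 1, items =>
    if 3 < items.length then
      let _total_break := PySem.Int.floordiv (items.length : Int) 3
      match aPass items with
      | some newItems => aLoop fuel newItems
      | none => none
    else some items

def tukeys_ninthers (items : List Int) : Int :=
  match aLoop (items.length + 1) items with
  | some its =>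
      if its.length = 3 then
        (PySem.List.pyGet? (PySem.List.sorted its (fun v => v) false) 1).getD 0
      else (PySem.List.pyGet? its 0).getD 0
  | none => 0   -- Python raised IndexError (excluded by Pre_)

-- ===== PORT B =====
-- medians = [sorted(items[i:i+3])[1] for i in range(0, len(items), 3)]
def bMedians (items : List Int) : List Int :=
  (PySem.List.pyRange 0 (items.length : Int) 3).map
    (fun i => (PySem.List.pyGet? (PySem.List.sorted (PySem.List.slice items (some i) (some (i + 3))) (fun v => v) false) 1).getD 0)

-- termination: each recursive step shrinks the list (cited by decreasing_by below)
theorem bMedians_length_lt (items : List Int) (h : 3 < items.length) :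
    (bMedians items).length < items.length := by
  simp only [bMedians, List.length_map]
  rw [PySem.List.pyRange_of_pos 0 (items.length : Int) (by norm_num)]
  simp only [List.length_map, List.length_range]
  split
  · omega
  · omega

def tukeys_ninthers_alt (items : List Int) : Int :=
  if 3 < items.length then tukeys_ninthers_alt (bMedians items)
  else if items.length = 3 then
    (PySem.List.pyGet? (PySem.List.sorted items (fun v => v) false) 1).getD 0
  else (PySem.List.pyGet? items 0).getD 0
termination_by items.length
decreasing_by exact bMedians_length_lt items (by assumption)

-- ===== PRECONDITION & SPEC =====
-- Pre_ excludes exactly the inputs on which Python A raises IndexError: the empty list and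
-- lists whose length cannot be divided by 3 down to at most 3 (A's pass needs 3 | len).
def Pre_tukeys_ninthers (items : List Int) : Prop :=
  items ≠ [] ∧ ∃ k, k < items.length ∧ 3 ^ k ∣ items.length ∧ items.length ≤ 3 ^ (k + 1)
instance (items : List Int) : Decidable (Pre_tukeys_ninthers items) := by
  unfold Pre_tukeys_ninthers; infer_instance

def pvWitness_tukeys_ninthers : List Int := [3, 1, 2]

def Spec_tukeys_ninthers (items : List Int) (out : Int) : Prop := out = tukeys_ninthers_alt items
instance (items : List Int) (out : Int) : Decidable (Spec_tukeys_ninthers items out) := by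
  unfold Spec_tukeys_ninthers; infer_instance

-- ===== CLAIM (what is proved, stated in full; the proofs are below) =====
def Claim_equal_tukeys_ninthers : Prop := ∀ (items : List Int), Dom_tukeys_ninthers items → Pre_tukeys_ninthers items → Spec_tukeys_ninthers items (tukeys_ninthers items)

-- ===== LEMMAS AND PROOFS =====

-- the common median-of-three value both passes append per chunk
def med3 (x y z : Int) : Int :=
  (PySem.List.pyGet? (PySem.List.sorted [x, y, z] (fun v => v) false) 1).getD 0

-- structural form of one reduction pass over exact triples
def medGo : List Int → List Int
  | a :: b :: c :: r => med3 a b c :: medGo r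
  | _ => []

theorem pyRange3_nil (a b : Int) (h : b ≤ a) : PySem.List.pyRange a b 3 = [] := by
  rw [PySem.List.pyRange_of_pos a b (by norm_num)]
  simp [not_lt.mpr h]

theorem pyRange3_cons (a b : Int) (h : a < b) :
    PySem.List.pyRange a b 3 = a :: PySem.List.pyRange (a + 3) b 3 := by
  rw [PySem.List.pyRange_of_pos a b (by norm_num),
      PySem.List.pyRange_of_pos (a + 3) b (by norm_num)]
  have hn : (if a < b then ((b - a + 3 - 1) / 3).toNat else 0)
      = (if a + 3 < b then ((b - (a + 3) + 3 - 1) / 3).toNat else 0) + 1 := by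
    split <;> split <;> omega
  rw [hn, List.range_succ_eq_map]
  simp only [List.map_cons, List.map_map, Nat.cast_zero, mul_zero, add_zero]
  congr 1
  apply List.map_congr_left
  intro k _
  simp only [Function.comp_apply]
  push_cast
  ring

theorem medGo_length : ∀ (m : Nat) (L : List Int), L.length = 3 * m → (medGo L).length = m := by
  intro m
  induction m with
  | zero =>
    intro L h
    match L, h with
    | [], _ => simp [medGo]
  | succ m ih =>
    intro L h
    match L, h with
    | a :: b :: c :: r, h =>
      simp only [medGo, List.length_cons]
      rw [ih r (by simp at h; omega)]

theorem passAux : ∀ (m : Nat) (L : List Int) (j : Nat) (acc : List Int),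
    L.length = j + 3 * m →
    (PySem.List.pyRange ((j : Int) + 2) ((L.length : Int) + 2) 3).foldl (aBody L) (some acc)
      = some (acc ++ medGo (L.drop j)) := by
  intro m
  induction m with
  | zero =>
    intro L j acc h
    rw [pyRange3_nil _ _ (by omega)]
    have : L.drop j = [] := by
      apply List.drop_eq_nil_of_le; omega
    simp [this, medGo]
  | succ m ih =>
    intro L j acc h
    have hdl : (L.drop j).length = 3 * (m + 1) := by simp; omega
    match hd : L.drop j, hdl with
    | a :: b :: c :: r, _ =>
      have hr : r.length = 3 * m := by
        have := hdl; rw [hd] at this; simp at this; omega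
      have ha : L[j]? = some a := by
        have h0 : (L.drop j)[0]? = some a := by rw [hd]; rfl
        rw [List.getElem?_drop] at h0; simpa using h0
      have hb : L[j + 1]? = some b := by
        have h0 : (L.drop j)[1]? = some b := by rw [hd]; rfl
        rw [List.getElem?_drop] at h0; simpa using h0
      have hc : L[j + 2]? = some c := by
        have h0 : (L.drop j)[2]? = some c := by rw [hd]; rfl
        rw [List.getElem?_drop] at h0; simpa using h0
      rw [pyRange3_cons _ _ (by omega)]
      rw [List.foldl_cons]
      have hbody : aBody L (some acc) ((j : Int) + 2) = some (acc ++ [med3 a b c]) := by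
        have e0 : (j : Int) + 2 - 2 = ((j : Nat) : Int) := by ring
        have e1 : (j : Int) + 2 - 1 = (((j + 1 : Nat)) : Int) := by push_cast; ring
        have e2 : (j : Int) + 2 = (((j + 2 : Nat)) : Int) := by push_cast; ring
        simp only [aBody]
        rw [e0, e1, e2]
        simp only [PySem.List.pyGet?_natCast, ha, hb, hc]
        rfl
      rw [hbody]
      have e3 : (j : Int) + 2 + 3 = (((j + 3 : Nat)) : Int) + 2 := by push_cast; ring
      rw [e3, ih L (j + 3) (acc ++ [med3 a b c]) (by omega)]
      have hdrop3 : L.drop (j + 3) = r := by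
        have h1 : (L.drop j).drop 3 = r := by rw [hd]; rfl
        rw [List.drop_drop] at h1
        simpa [Nat.add_comm] using h1
      rw [hdrop3]
      simp [medGo]

theorem aPass_eq (m : Nat) (L : List Int) (h : L.length = 3 * m) :
    aPass L = some (medGo L) := by
  have := passAux m L 0 [] (by omega)
  simpa [aPass] using this

theorem bAux : ∀ (m : Nat) (L : List Int) (j : Nat),
    L.length = j + 3 * m →
    (PySem.List.pyRange (j : Int) ((L.length : Int)) 3).map
      (fun i => (PySem.List.pyGet? (PySem.List.sorted (PySem.List.slice L (some i) (some (i + 3))) (fun v => v) false) 1).getD 0)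
      = medGo (L.drop j) := by
  intro m
  induction m with
  | zero =>
    intro L j h
    rw [pyRange3_nil _ _ (by omega)]
    have : L.drop j = [] := by apply List.drop_eq_nil_of_le; omega
    simp [this, medGo]
  | succ m ih =>
    intro L j h
    have hdl : (L.drop j).length = 3 * (m + 1) := by simp; omega
    match hd : L.drop j, hdl with
    | a :: b :: c :: r, _ =>
      rw [pyRange3_cons _ _ (by omega)]
      rw [List.map_cons]
      have hslice : PySem.List.slice L (some (j : Int)) (some ((j : Int) + 3)) = [a, b, c] := by
        have e : (j : Int) + 3 = (j : Int) + ((3 : Nat) : Int) := by push_cast; ring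
        rw [e, PySem.List.slice_natCast_add, hd]
        rfl
      rw [hslice]
      have e3 : (j : Int) + 3 = ((j + 3 : Nat) : Int) := by push_cast; ring
      rw [e3, ih L (j + 3) (by omega)]
      have hdrop3 : L.drop (j + 3) = r := by
        have h1 : (L.drop j).drop 3 = r := by rw [hd]; rfl
        rw [List.drop_drop] at h1
        simpa [Nat.add_comm] using h1
      rw [hdrop3]
      simp [medGo, med3]

theorem bMedians_eq (m : Nat) (L : List Int) (h : L.length = 3 * m) :
    bMedians L = medGo L := by
  have := bAux m L 0 (by omega)
  simpa [bMedians] using this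

-- the final 'if len==3 … else items[0]' read off an aLoop result
def finish : Option (List Int) → Int
  | some its =>
      if its.length = 3 then
        (PySem.List.pyGet? (PySem.List.sorted its (fun v => v) false) 1).getD 0
      else (PySem.List.pyGet? its 0).getD 0
  | none => 0

theorem tukeys_ninthers_eq_finish (items : List Int) :
    tukeys_ninthers items = finish (aLoop (items.length + 1) items) := rfl

-- the length condition under which A's reduction terminates normally
def GoodLen (n : Nat) : Prop := ∃ k, 3 ^ k ∣ n ∧ n ≤ 3 ^ (k + 1)

theorem alt_step (L : List Int) (h : 3 < L.length) :
    tukeys_ninthers_alt L = tukeys_ninthers_alt (bMedians L) := by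
  rw [tukeys_ninthers_alt]
  simp [h]

theorem alt_base (L : List Int) (h : ¬ 3 < L.length) :
    tukeys_ninthers_alt L =
      (if L.length = 3 then
        (PySem.List.pyGet? (PySem.List.sorted L (fun v => v) false) 1).getD 0
      else (PySem.List.pyGet? L 0).getD 0) := by
  rw [tukeys_ninthers_alt]
  simp [h]

theorem key : ∀ (fuel : Nat) (L : List Int), L ≠ [] → GoodLen L.length → L.length ≤ fuel →
    finish (aLoop (fuel + 1) L) = tukeys_ninthers_alt L := by
  intro fuel
  induction fuel with
  | zero =>
    intro L hne _ hle
    exact absurd (List.length_eq_zero_iff.mp (by omega)) hne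
  | succ f ih =>
    intro L hne hgood hle
    by_cases h3 : 3 < L.length
    · -- one pass: 3 divides the length
      obtain ⟨k, hdvd, hub⟩ := hgood
      have hk : ∃ k', k = k' + 1 := by
        cases k with
        | zero => exfalso; simp at hub; omega
        | succ k' => exact ⟨k', rfl⟩
      obtain ⟨k', rfl⟩ := hk
      have h3dvd : 3 ∣ L.length := dvd_trans (dvd_pow_self 3 (Nat.succ_ne_zero k')) hdvd
      obtain ⟨m, hm⟩ := h3dvd
      have hpass : aPass L = some (medGo L) := aPass_eq m L hm
      have hloop : aLoop (f + 1 + 1) L = aLoop (f + 1) (medGo L) := by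
        simp [aLoop, h3, hpass]
      have hlen : (medGo L).length = m := medGo_length m L hm
      have hm2 : 2 ≤ m := by omega
      have hf : ∃ f', f = f' + 1 := by
        cases f with
        | zero => omega
        | succ f' => exact ⟨f', rfl⟩
      obtain ⟨f', rfl⟩ := hf
      have hrec := ih (medGo L)
        (by intro hnil; rw [hnil] at hlen; simp at hlen; omega)
        (by
          refine ⟨k', ?_, ?_⟩
          · obtain ⟨c, hc⟩ := hdvd
            refine ⟨c, ?_⟩
            have h1 : 3 * m = 3 * (3 ^ k' * c) := by
              rw [← hm, hc]; ring
            omega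
          · have h2 : 3 ^ (k' + 1 + 1) = 3 * 3 ^ (k' + 1) := by ring
            rw [h2, hm] at hub
            omega)
        (by rw [hlen]; omega)
      rw [hloop, hrec, alt_step L h3, bMedians_eq m L hm]
    · -- loop does not run
      have hloop : aLoop (f + 1 + 1) L = some L := by simp [aLoop, h3]
      rw [hloop, alt_base L h3]
      rfl

-- ===== VERDICT (by name: the statement is the Claim_ definition above) =====
theorem tukeys_ninthers_spec : Claim_equal_tukeys_ninthers := by
  intro items _ hpre
  obtain ⟨hne, k, _, hdvd, hub⟩ := hpre
  unfold Spec_tukeys_ninthers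
  rw [tukeys_ninthers_eq_finish]
  exact key items.length items hne ⟨k, hdvd, hub⟩ (le_refl _)
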